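-- pv_equiv track=rewrite | github.com/allamberto/cse-30872-fa18-assignments | challenge06/program.py | make_ordered_set
-- ===== SOURCE A (Python) =====
-- def make_ordered_set(f):
--     options = []
--     seq = []
--
--     #4. Check for Edge Case of Length 1
--     if len(f) == 1:
--         return f
--
--     #5. Create Each Possible Set
--     for i in range(len(f)):
--         j = i
--         while(j < len(f)):
--             if f[j] not in seq:
--                 seq.append(f[j])
--                 j += 1
--             else:
--                 options.append(seq)
--                 seq = []
--                 break;
--
--     #6. Check Lengths of Sets
--     result = []
--     for list in options:
--         if len(list) > len(result):
--             result = list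
--
--     #7. Return Longest Set
--     return result
-- ===== SOURCE B (Python) =====
-- def make_ordered_set(f):
--     # single-pass sliding window: longest window without repeats, leftmost on ties
--     last = {}
--     left = 0
--     best_l = 0
--     best_n = 0
--     for r, x in enumerate(f):
--         if x in last and last[x] >= left:
--             left = last[x] + 1
--         last[x] = r
--         if r - left + 1 > best_n:
--             best_l = left
--             best_n = r - left + 1
--     return f[best_l:best_l + best_n]
-- ===== Notes on version B (the rewrite author's own statement) =====
-- stated objective: faster
-- what changed: Replaced the stateful quadratic rescan-from-each-start (collecting candidate runs in a list, then a second max pass) with a single-pass sliding window keeping a last-seen index dict and the leftmost longest window.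
import Mathlib
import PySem

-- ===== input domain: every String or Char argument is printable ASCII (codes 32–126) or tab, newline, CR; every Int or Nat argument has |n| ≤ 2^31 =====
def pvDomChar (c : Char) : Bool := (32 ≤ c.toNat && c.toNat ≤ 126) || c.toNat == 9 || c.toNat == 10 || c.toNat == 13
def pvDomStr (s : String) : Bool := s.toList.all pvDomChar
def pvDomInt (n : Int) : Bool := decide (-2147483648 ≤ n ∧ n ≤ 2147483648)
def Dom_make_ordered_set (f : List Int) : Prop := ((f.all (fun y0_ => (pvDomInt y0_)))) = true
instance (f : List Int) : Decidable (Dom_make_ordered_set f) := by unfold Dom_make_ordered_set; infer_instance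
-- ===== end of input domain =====

-- B replaces A's stateful rescan-from-each-start (quadratic/cubic) with a single-pass
-- sliding window over the list (objective: faster).

-- ===== PORT A =====
-- inner `while(j < len(f))` loop of A: returns the updated (seq, options)
def pvInner (f : List Int) (seq : List Int) (options : List (List Int)) (j : Nat) :
    List Int × List (List Int) :=
  if h : j < f.length then
    if f[j] ∈ seq then ([], options ++ [seq])
    else pvInner f (seq ++ [f[j]]) options (j + 1)
  else (seq, options)
termination_by f.length - j

def make_ordered_set (f : List Int) : List Int :=
  if f.length = 1 then f
  else
    let st := (List.range f.length).foldl
      (fun (st : List Int × List (List Int)) i => pvInner f st.1 st.2 i) ([], [])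
    st.2.foldl (fun result l => if l.length > result.length then l else result) []

-- ===== PORT B =====
-- one step of the sliding-window loop: state (last, left, best_l, best_n), item (r, x)
def pvBStep (st : PySem.Dict Int Int × Int × Int × Int) (p : Int × Int) :
    PySem.Dict Int Int × Int × Int × Int :=
  let last := st.1
  let left := st.2.1
  let best_l := st.2.2.1
  let best_n := st.2.2.2
  let r := p.1
  let x := p.2
  let left :=
    match last.get? x with
    | some j => if left ≤ j then j + 1 else left
    | none => left
  let last := last.insert x r
  if best_n < r - left + 1 then (last, left, left, r - left + 1)
  else (last, left, best_l, best_n)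

def make_ordered_set_alt (f : List Int) : List Int :=
  let st := (PySem.List.enumerate f).foldl pvBStep (PySem.Dict.empty, 0, 0, 0)
  PySem.List.slice f (some st.2.2.1) (some (st.2.2.1 + st.2.2.2))

-- ===== PRECONDITION & SPEC =====
def Spec_make_ordered_set (f : List Int) (out : List Int) : Prop := out = make_ordered_set_alt f
instance (f : List Int) (out : List Int) : Decidable (Spec_make_ordered_set f out) := by unfold Spec_make_ordered_set; infer_instance

-- ===== CLAIM (what is proved, stated in full; the proofs are below) =====
def Claim_equal_make_ordered_set : Prop := ∀ (f : List Int), Dom_make_ordered_set f → Spec_make_ordered_set f (make_ordered_set f)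

-- ===== LEMMAS AND PROOFS =====

-- ---- generic `pick the first longest` fold ----
def pick (b x : List Int) : List Int := if x.length > b.length then x else b

theorem foldl_pick_nop (ms : List (List Int)) (b : List Int)
    (h : ∀ x ∈ ms, x.length ≤ b.length) : ms.foldl pick b = b := by
  induction ms with
  | nil => rfl
  | cons y ys ih =>
    have hy := h y (by simp)
    have hpy : pick b y = b := by unfold pick; rw [if_neg (by omega)]
    simp only [List.foldl_cons, hpy]
    exact ih (fun x hx => h x (by simp [hx]))

theorem length_le_foldl_pick (ms : List (List Int)) (b : List Int) :
    b.length ≤ (ms.foldl pick b).length := by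
  induction ms generalizing b with
  | nil => simp
  | cons y ys ih =>
    simp only [List.foldl_cons]
    refine le_trans ?_ (ih (pick b y))
    simp only [pick]; split <;> omega

theorem le_foldl_pick_of_mem {ms : List (List Int)} {x : List Int} (hx : x ∈ ms) (b : List Int) :
    x.length ≤ (ms.foldl pick b).length := by
  induction ms generalizing b with
  | nil => cases hx
  | cons y ys ih =>
    rcases List.mem_cons.1 hx with rfl | hx'
    · refine le_trans ?_ (length_le_foldl_pick ys (pick b x))
      simp only [pick]; split <;> omega
    · exact ih hx' (pick b y)

theorem foldl_pick_first_max (pre : List (List Int)) (x : List Int) (post : List (List Int))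
    (b : List Int) (hb : b.length < x.length)
    (hpre : ∀ y ∈ pre, y.length < x.length) (hpost : ∀ z ∈ post, z.length ≤ x.length) :
    (pre ++ x :: post).foldl pick b = x := by
  induction pre generalizing b with
  | nil =>
    have hpx : pick b x = x := by unfold pick; rw [if_pos (by omega)]
    simp only [List.nil_append, List.foldl_cons, hpx]
    exact foldl_pick_nop post x hpost
  | cons y ys ih =>
    simp only [List.cons_append, List.foldl_cons]
    have hy := hpre y (by simp)
    have hb' : (pick b y).length < x.length := by
      simp only [pick]; split <;> omega
    exact ih (pick b y) hb' (fun z hz => hpre z (by simp [hz]))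

-- same shape for the (left, len) pairs tracked by B
def pick2 (b q : Nat × Nat) : Nat × Nat := if b.2 < q.2 then q else b

theorem foldl_pick2_first_max (pre : List (Nat × Nat)) (q : Nat × Nat) (post : List (Nat × Nat))
    (b : Nat × Nat) (hb : b.2 < q.2)
    (hpre : ∀ y ∈ pre, y.2 < q.2) (hpost : ∀ z ∈ post, z.2 ≤ q.2) :
    (pre ++ q :: post).foldl pick2 b = q := by
  induction pre generalizing b with
  | nil =>
    have hpq : pick2 b q = q := by unfold pick2; rw [if_pos hb]
    simp only [List.nil_append, List.foldl_cons, hpq]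
    clear hb hpre
    induction post with
    | nil => rfl
    | cons z zs ihz =>
      have hz := hpost z (by simp)
      have hpz : pick2 q z = q := by unfold pick2; rw [if_neg (by omega)]
      simp only [List.foldl_cons, hpz]
      exact ihz (fun z' hz' => hpost z' (by simp [hz']))
  | cons y ys ih =>
    simp only [List.cons_append, List.foldl_cons]
    have hy := hpre y (by simp)
    have hb' : (pick2 b y).2 < q.2 := by
      simp only [pick2]; split <;> omega
    exact ih (pick2 b y) hb' (fun z hz => hpre z (by simp [hz]))

-- ---- the greedy distinct run from a start (spec for A's inner loop) ----
def scanRun : List Int → List Int → List Int × Bool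
  | seq, [] => (seq, false)
  | seq, x :: xs => if x ∈ seq then (seq, true) else scanRun (seq ++ [x]) xs

def runF (f : List Int) (i : Nat) : List Int := (scanRun [] (f.drop i)).1

theorem scanRun_nil (seq : List Int) : scanRun seq [] = (seq, false) := rfl

theorem scanRun_cons (seq : List Int) (x : Int) (xs : List Int) :
    scanRun seq (x :: xs) = if x ∈ seq then (seq, true) else scanRun (seq ++ [x]) xs := rfl

theorem scanRun_len_ge (l seq : List Int) : seq.length ≤ (scanRun seq l).1.length := by
  induction l generalizing seq with
  | nil => simp [scanRun]
  | cons x xs ih =>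
    by_cases hx : x ∈ seq
    · simp [scanRun, hx]
    · rw [scanRun_cons, if_neg hx]
      have := ih (seq ++ [x])
      simp only [List.length_append, List.length_cons, List.length_nil] at this ⊢
      omega

theorem scanRun_len_le (l seq : List Int) : (scanRun seq l).1.length ≤ seq.length + l.length := by
  induction l generalizing seq with
  | nil => simp [scanRun]
  | cons x xs ih =>
    by_cases hx : x ∈ seq
    · simp [scanRun, hx]
    · rw [scanRun_cons, if_neg hx]
      have := ih (seq ++ [x])
      simp only [List.length_append, List.length_cons, List.length_nil] at this ⊢
      omega

theorem scanRun_no_break (l seq : List Int) (hs : seq.Nodup)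
    (h : (scanRun seq l).2 = false) :
    (scanRun seq l).1 = seq ++ l ∧ (seq ++ l).Nodup := by
  induction l generalizing seq with
  | nil => simp [scanRun] at hs ⊢; exact hs
  | cons x xs ih =>
    by_cases hx : x ∈ seq
    · simp [scanRun, hx] at h
    · rw [scanRun_cons, if_neg hx] at h ⊢
      have hs' : (seq ++ [x]).Nodup := by
        simp [List.nodup_append, hs]
        exact fun a ha e => hx (e ▸ ha)
      have := ih (seq ++ [x]) hs' h
      constructor
      · rw [this.1]; simp
      · simpa using this.2

theorem scanRun_take (l seq : List Int) :
    (scanRun seq l).1 = seq ++ l.take ((scanRun seq l).1.length - seq.length) := by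
  induction l generalizing seq with
  | nil => simp [scanRun]
  | cons x xs ih =>
    by_cases hx : x ∈ seq
    · simp [scanRun, hx]
    · rw [scanRun_cons, if_neg hx]
      have hge := scanRun_len_ge xs (seq ++ [x])
      simp only [List.length_append, List.length_cons, List.length_nil] at hge
      have hk : (scanRun (seq ++ [x]) xs).1.length - seq.length
          = ((scanRun (seq ++ [x]) xs).1.length - (seq.length + 1)) + 1 := by omega
      rw [hk, List.take_succ_cons]
      have hih := ih (seq ++ [x])
      simp only [List.length_append, List.length_cons, List.length_nil, Nat.zero_add] at hih
      exact hih.trans (by simp)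

theorem scanRun_nodup (l seq : List Int) (hs : seq.Nodup) : (scanRun seq l).1.Nodup := by
  induction l generalizing seq with
  | nil => exact hs
  | cons x xs ih =>
    by_cases hx : x ∈ seq
    · simpa [scanRun, hx] using hs
    · rw [scanRun_cons, if_neg hx]
      refine ih (seq ++ [x]) ?_
      simp [List.nodup_append, hs]
      exact fun a ha e => hx (e ▸ ha)

theorem scanRun_max (l seq : List Int) (m : Nat) (hm : m ≤ l.length)
    (h : (seq ++ l.take m).Nodup) : seq.length + m ≤ (scanRun seq l).1.length := by
  induction l generalizing seq m with
  | nil =>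
    simp only [List.length_nil, Nat.le_zero] at hm
    subst hm
    simp [scanRun]
  | cons x xs ih =>
    match m with
    | 0 => simpa using scanRun_len_ge (x :: xs) seq
    | m' + 1 =>
      rw [List.take_succ_cons] at h
      have hx : x ∉ seq := by
        rcases List.nodup_append.1 h with ⟨-, -, hd⟩
        exact fun hc => hd x hc x (by simp) rfl
      have h' : ((seq ++ [x]) ++ xs.take m').Nodup := by simpa using h
      rw [scanRun_cons, if_neg hx]
      have := ih (seq ++ [x]) m' (by simpa using hm) h'
      simp only [List.length_append, List.length_cons, List.length_nil] at this ⊢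
      omega

theorem runF_len_le (f : List Int) (i : Nat) : (runF f i).length ≤ f.length - i := by
  have := scanRun_len_le (f.drop i) []
  simpa [runF] using this

theorem runF_take (f : List Int) (i : Nat) :
    runF f i = (f.drop i).take (runF f i).length := by
  have := scanRun_take (f.drop i) []
  simpa [runF] using this

theorem runF_nodup (f : List Int) (i : Nat) : (runF f i).Nodup := by
  exact scanRun_nodup (f.drop i) [] List.nodup_nil

theorem runF_max (f : List Int) (i m : Nat) (hm : m ≤ f.length - i)
    (h : ((f.drop i).take m).Nodup) : m ≤ (runF f i).length := by
  have := scanRun_max (f.drop i) [] m (by simpa using hm) (by simpa using h)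
  simpa [runF] using this

theorem runF_pos (f : List Int) (i : Nat) (h : i < f.length) : 1 ≤ (runF f i).length := by
  have hm : 1 ≤ f.length - i := by omega
  apply runF_max f i 1 hm
  cases f.drop i with
  | nil => simp
  | cons a l => simp

-- ---- A's loops in terms of scanRun / runF ----
theorem pvInner_eq_scanRun (f : List Int) : ∀ (j : Nat) (seq : List Int) (options : List (List Int)),
    pvInner f seq options j =
      (match scanRun seq (f.drop j) with
       | (s, true) => ([], options ++ [s])
       | (s, false) => (s, options)) := by
  have key : ∀ (fuel j : Nat), f.length - j ≤ fuel → ∀ (seq : List Int) (options : List (List Int)),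
      pvInner f seq options j =
        (match scanRun seq (f.drop j) with
         | (s, true) => ([], options ++ [s])
         | (s, false) => (s, options)) := by
    intro fuel
    induction fuel with
    | zero =>
      intro j hj seq options
      rw [pvInner, dif_neg (by omega), List.drop_eq_nil_of_le (by omega), scanRun_nil]
    | succ fu ih =>
      intro j hj seq options
      by_cases h : j < f.length
      · rw [pvInner, dif_pos h, List.drop_eq_getElem_cons h, scanRun_cons]
        by_cases hmem : f[j] ∈ seq
        · rw [if_pos hmem, if_pos hmem]
        · rw [if_neg hmem, if_neg hmem, ih (j + 1) (by omega) (seq ++ [f[j]]) options]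
      · rw [pvInner, dif_neg h, List.drop_eq_nil_of_le (by omega), scanRun_nil]
  exact fun j seq options => key (f.length - j) j le_rfl seq options

-- the joint E/F invariant of A's outer loop
theorem A_outer_EF (f : List Int) : ∀ (m : Nat),
    (∀ (i : Nat) (os : List (List Int)) (b : List Int), i + m = f.length →
      (os.foldl pick b ≠ [] ∨ (i = 0 ∧ f.length ≠ 1)) →
      (((List.range' i m).foldl
          (fun (st : List Int × List (List Int)) i => pvInner f st.1 st.2 i) ([], os)).2).foldl pick b
        = ((List.range' i m).map (runF f)).foldl pick (os.foldl pick b)) ∧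
    (∀ (i k : Nat) (os : List (List Int)) (b : List Int), i + m = f.length → 1 ≤ m → k < i →
      (f.drop k).Nodup →
      (((List.range' i m).foldl
          (fun (st : List Int × List (List Int)) i => pvInner f st.1 st.2 i) (f.drop k, os)).2).foldl pick b
        = pick (os.foldl pick b) (f.drop k)) := by
  intro m
  induction m with
  | zero =>
    constructor
    · intro i os b _ _
      simp
    · intro i k os b _ hm
      omega
  | succ m ih =>
    have hE := ih.1
    have hF := ih.2
    constructor
    · -- E (m+1)
      intro i os b hsum H
      have hi : i < f.length := by omega
      set b0 := os.foldl pick b with hb0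
      rw [List.range'_succ]
      simp only [List.foldl_cons, List.map_cons]
      rw [pvInner_eq_scanRun]
      cases hscan : scanRun [] (f.drop i) with
      | mk sres br =>
        have hrun : runF f i = sres := by rw [runF, hscan]
        cases br with
        | true =>
          simp only []
          have hlen1 : 1 ≤ sres.length := hrun ▸ runF_pos f i hi
          have hne : (os ++ [sres]).foldl pick b ≠ [] := by
            have := le_foldl_pick_of_mem (ms := os ++ [sres]) (x := sres) (by simp) b
            intro hc
            rw [hc] at this
            simp only [List.length_nil] at this
            omega
          have := hE (i + 1) (os ++ [sres]) b (by omega) (Or.inl hne)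
          rw [this, List.foldl_append]
          simp only [List.foldl_cons, List.foldl_nil, List.foldl_cons]
          rw [hrun]
        | false =>
          simp only []
          obtain ⟨hs1, hnd⟩ := scanRun_no_break (f.drop i) [] List.nodup_nil (by rw [hscan])
          rw [hscan] at hs1
          simp only [List.nil_append] at hs1 hnd
          have hdi : (f.drop i).length = f.length - i := List.length_drop ..
          cases m with
          | zero =>
            simp only [List.range'_zero, List.foldl_nil, List.map_nil]
            have hb0ne : b0 ≠ [] := by
              rcases H with h1 | h2
              · exact h1
              · omega
            have hb0len : 1 ≤ b0.length := List.length_pos_iff.2 hb0ne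
            have : runF f i = f.drop i := by rw [hrun, hs1]
            rw [this]
            unfold pick
            rw [if_neg (by rw [hdi]; omega)]
            exact hb0.symm
          | succ m' =>
            have hFr := hF (i + 1) i os b (by omega) (by omega) (by omega) hnd
            have hri : runF f i = f.drop i := by rw [hrun, hs1]
            rw [hs1, hri, hFr]
            symm
            apply foldl_pick_nop
            intro y hy
            obtain ⟨j, hj, rfl⟩ := List.mem_map.1 hy
            have hj' := List.mem_range'_1.1 hj
            have h1 : (runF f j).length ≤ f.length - j := runF_len_le f j
            have h2 : (f.drop i).length ≤ (pick b0 (f.drop i)).length := by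
              unfold pick
              split <;> omega
            rw [hdi] at h2
            omega
    · -- F (m+1)
      intro i k os b hsum _ hk hnd
      have hi : i < f.length := by omega
      set b0 := os.foldl pick b with hb0
      rw [List.range'_succ]
      simp only [List.foldl_cons]
      rw [pvInner_eq_scanRun, List.drop_eq_getElem_cons hi, scanRun_cons]
      have hmem : f[i] ∈ f.drop k := by
        have hik : i - k < (f.drop k).length := by
          rw [List.length_drop]
          omega
        have : (f.drop k)[i - k] = f[i] := by
          rw [List.getElem_drop]
          congr 1
          omega
        rw [← this]
        exact List.getElem_mem hik
      rw [if_pos hmem]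
      simp only []
      have hne : (os ++ [f.drop k]).foldl pick b ≠ [] := by
        have := le_foldl_pick_of_mem (ms := os ++ [f.drop k]) (x := f.drop k) (by simp) b
        intro hc
        rw [hc] at this
        simp only [List.length_nil] at this
        have : 1 ≤ (f.drop k).length := by
          rw [List.length_drop]
          omega
        omega
      have := hE (i + 1) (os ++ [f.drop k]) b (by omega) (Or.inl hne)
      rw [this, List.foldl_append]
      simp only [List.foldl_cons, List.foldl_nil]
      apply foldl_pick_nop
      intro y hy
      obtain ⟨j, hj, rfl⟩ := List.mem_map.1 hy
      have hj' := List.mem_range'_1.1 hj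
      have h1 : (runF f j).length ≤ f.length - j := runF_len_le f j
      have h2 : (f.drop k).length ≤ (pick (os.foldl pick b) (f.drop k)).length := by
        unfold pick
        split <;> omega
      rw [List.length_drop] at h2
      omega

theorem A_char (f : List Int) :
    make_ordered_set f = ((List.range f.length).map (runF f)).foldl pick [] := by
  by_cases h1 : f.length = 1
  · obtain ⟨a, rfl⟩ : ∃ a, f = [a] := by
      match f, h1 with
      | [a], _ => exact ⟨a, rfl⟩
    simp [make_ordered_set, runF, scanRun, pick, List.range_succ]
  · unfold make_ordered_set
    rw [if_neg h1]
    have hEF := (A_outer_EF f f.length).1 0 [] [] (by omega) (Or.inr ⟨rfl, h1⟩)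
    rw [List.range_eq_range']
    exact hEF

-- ---- sliding-window spec side ----
-- last index j < r with f[j] = x
def lastIdx (f : List Int) : Nat → Int → Option Nat
  | 0, _ => none
  | r + 1, x => if f[r]? = some x then some r else lastIdx f r x

-- least l with f[l..r-1] duplicate-free
def winLeft (f : List Int) (r : Nat) : Nat :=
  Nat.find (p := fun l => ((f.take r).drop l).Nodup) ⟨r, by simp⟩

theorem window_eq (f : List Int) (l r : Nat) :
    (f.take r).drop l = (f.drop l).take (r - l) := by
  exact List.drop_take

theorem winLeft_le (f : List Int) (r : Nat) : winLeft f r ≤ r := by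
  apply Nat.find_le
  rw [List.drop_eq_nil_of_le (by simp)]
  exact List.nodup_nil

theorem winLeft_spec (f : List Int) (l r : Nat) :
    ((f.drop l).take (r - l)).Nodup ↔ winLeft f r ≤ l := by
  rw [← window_eq]
  constructor
  · intro h
    exact Nat.find_le h
  · intro hle
    have hspec : ((f.take r).drop (winLeft f r)).Nodup := Nat.find_spec (p := fun l => ((f.take r).drop l).Nodup) ⟨r, by simp⟩
    have : (f.take r).drop l = ((f.take r).drop (winLeft f r)).drop (l - winLeft f r) := by
      rw [List.drop_drop]
      congr 1
      omega
    rw [this]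
    exact hspec.sublist (List.drop_sublist _ _)

theorem lastIdx_some (f : List Int) (r : Nat) (x : Int) (j : Nat) (h : lastIdx f r x = some j) :
    j < r ∧ f[j]? = some x ∧ ∀ j', j < j' → j' < r → f[j']? ≠ some x := by
  induction r with
  | zero => simp [lastIdx] at h
  | succ r ih =>
    unfold lastIdx at h
    by_cases hc : f[r]? = some x
    · rw [if_pos hc] at h
      cases h
      exact ⟨by omega, by assumption, fun j' h1 h2 => by intro _; omega⟩
    · rw [if_neg hc] at h
      obtain ⟨h1, h2, h3⟩ := ih h
      refine ⟨by omega, h2, fun j' hj1 hj2 => ?_⟩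
      by_cases hjr : j' = r
      · subst hjr
        exact hc
      · exact h3 j' hj1 (by omega)

theorem lastIdx_none (f : List Int) (r : Nat) (x : Int) (h : lastIdx f r x = none) :
    ∀ j < r, f[j]? ≠ some x := by
  induction r with
  | zero => omega
  | succ r ih =>
    unfold lastIdx at h
    by_cases hc : f[r]? = some x
    · rw [if_pos hc] at h
      cases h
    · rw [if_neg hc] at h
      intro j hj
      by_cases hjr : j = r
      · subst hjr
        exact hc
      · exact ih h j (by omega)

theorem mem_window_iff (f : List Int) (l r : Nat) (x : Int) :
    x ∈ (f.drop l).take (r - l) ↔ ∃ j, l ≤ j ∧ j < r ∧ f[j]? = some x := by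
  rw [List.mem_iff_getElem?]
  constructor
  · rintro ⟨k, hk⟩
    rw [List.getElem?_take] at hk
    split at hk
    · rw [List.getElem?_drop] at hk
      exact ⟨l + k, by omega, by omega, hk⟩
    · cases hk
  · rintro ⟨j, h1, h2, h3⟩
    refine ⟨j - l, ?_⟩
    rw [List.getElem?_take, if_pos (by omega), List.getElem?_drop]
    rw [show l + (j - l) = j by omega]
    exact h3

theorem winLeft_mono (f : List Int) (r : Nat) : winLeft f r ≤ winLeft f (r + 1) := by
  set w := winLeft f (r + 1) with hw
  have hwr : w ≤ r + 1 := winLeft_le f (r + 1)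
  apply (winLeft_spec f w r).1
  have hnd : ((f.drop w).take (r + 1 - w)).Nodup := (winLeft_spec f w (r + 1)).2 le_rfl
  have : (f.drop w).take (r - w) = ((f.drop w).take (r + 1 - w)).take (r - w) := by
    rw [List.take_take]
    congr 1
    omega
  rw [this]
  exact hnd.sublist (List.take_sublist _ _)

theorem window_succ (f : List Int) (r : Nat) (hr : r < f.length) (l : Nat) (hl : l ≤ r) :
    (f.drop l).take (r + 1 - l) = (f.drop l).take (r - l) ++ [f[r]] := by
  have h1 : r + 1 - l = (r - l) + 1 := by omega
  rw [h1, List.take_add_one, List.getElem?_drop]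
  rw [show l + (r - l) = r by omega]
  rw [List.getElem?_eq_getElem hr]
  rfl

-- the core sliding-window update rule
theorem winLeft_succ (f : List Int) (r : Nat) (hr : r < f.length) :
    winLeft f (r + 1) =
      (match lastIdx f r (f[r]) with
       | some j => if winLeft f r ≤ j then j + 1 else winLeft f r
       | none => winLeft f r) := by
  have hLr : winLeft f r ≤ r := winLeft_le f r
  cases hli : lastIdx f r (f[r]) with
  | none =>
    simp only []
    apply le_antisymm
    · apply (winLeft_spec f (winLeft f r) (r + 1)).1
      rw [window_succ f r hr (winLeft f r) hLr]
      have hnd : ((f.drop (winLeft f r)).take (r - winLeft f r)).Nodup :=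
        (winLeft_spec f (winLeft f r) r).2 le_rfl
      have hni : f[r] ∉ (f.drop (winLeft f r)).take (r - winLeft f r) := by
        rw [mem_window_iff]
        rintro ⟨j', h1, h2, h3⟩
        exact lastIdx_none f r (f[r]) hli j' h2 h3
      simp [List.nodup_append, hnd]
      exact fun a ha e => hni (e ▸ ha)
    · exact winLeft_mono f r
  | some j =>
    obtain ⟨hjr, hjx, hlast⟩ := lastIdx_some f r (f[r]) j hli
    by_cases hjL : winLeft f r ≤ j
    · simp only [if_pos hjL]
      apply le_antisymm
      · apply (winLeft_spec f (j + 1) (r + 1)).1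
        rw [window_succ f r hr (j + 1) (by omega)]
        have hnd : ((f.drop (j + 1)).take (r - (j + 1))).Nodup :=
          (winLeft_spec f (j + 1) r).2 (by omega)
        have hni : f[r] ∉ (f.drop (j + 1)).take (r - (j + 1)) := by
          rw [mem_window_iff]
          rintro ⟨j', h1, h2, h3⟩
          exact hlast j' (by omega) h2 h3
        simp [List.nodup_append, hnd]
        exact fun a ha e => hni (e ▸ ha)
      · -- j + 1 ≤ winLeft f (r+1): else the window would contain f[j] = f[r] twice
        by_contra hc
        have hwj : winLeft f (r + 1) ≤ j := Nat.lt_succ_iff.mp (Nat.not_le.mp hc)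
        have hnd : ((f.drop (winLeft f (r + 1))).take (r + 1 - winLeft f (r + 1))).Nodup :=
          (winLeft_spec f (winLeft f (r + 1)) (r + 1)).2 le_rfl
        obtain ⟨w, hwdef⟩ : ∃ w, winLeft f (r + 1) = w := ⟨_, rfl⟩
        rw [hwdef] at hwj hnd hc
        have hwlen : (f.drop w).length = f.length - w := List.length_drop ..
        have hlen : ((f.drop w).take (r + 1 - w)).length = r + 1 - w := by
          rw [List.length_take]
          omega
        have hjw : j - w < ((f.drop w).take (r + 1 - w)).length := by omega
        have hrw : r - w < ((f.drop w).take (r + 1 - w)).length := by omega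
        have hgj : ((f.drop w).take (r + 1 - w))[j - w] = f[j]'(by omega) := by
          rw [List.getElem_take, List.getElem_drop]
          congr 1
          omega
        have hgr : ((f.drop w).take (r + 1 - w))[r - w] = f[r] := by
          rw [List.getElem_take, List.getElem_drop]
          congr 1
          omega
        have hfj : f[j]'(by omega) = f[r] := by
          have := hjx
          rw [List.getElem?_eq_getElem (by omega : j < f.length)] at this
          exact Option.some_injective _ this
        have heq : ((f.drop w).take (r + 1 - w))[j - w] = ((f.drop w).take (r + 1 - w))[r - w] := by
          rw [hgj, hgr, hfj]
        have := (List.Nodup.getElem_inj_iff hnd).1 heq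
        omega
    · simp only [if_neg hjL]
      apply le_antisymm
      · apply (winLeft_spec f (winLeft f r) (r + 1)).1
        rw [window_succ f r hr (winLeft f r) hLr]
        have hnd : ((f.drop (winLeft f r)).take (r - winLeft f r)).Nodup :=
          (winLeft_spec f (winLeft f r) r).2 le_rfl
        have hni : f[r] ∉ (f.drop (winLeft f r)).take (r - winLeft f r) := by
          rw [mem_window_iff]
          rintro ⟨j', h1, h2, h3⟩
          by_cases hj' : j' ≤ j
          · omega
          · exact hlast j' (by omega) h2 h3
        simp [List.nodup_append, hnd]
        exact fun a ha e => hni (e ▸ ha)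
      · exact winLeft_mono f r

theorem winLeft_succ_le (f : List Int) (r : Nat) :
    winLeft f (r + 1) ≤ r := by
  apply (winLeft_spec f r (r + 1)).1
  rw [show r + 1 - r = 1 by omega]
  cases f.drop r with
  | nil => simp
  | cons a l => simp

-- the (best_l, best_n) pair after r steps, on the spec side
def best2 (f : List Int) (r : Nat) : Nat × Nat :=
  (List.range r).foldl (fun b r' => pick2 b (winLeft f (r' + 1), r' - winLeft f (r' + 1) + 1)) (0, 0)

theorem B_loop (f : List Int) : ∀ (r : Nat), r ≤ f.length →
    ∃ d : PySem.Dict Int Int,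
      (PySem.List.enumerate (f.take r)).foldl pvBStep (PySem.Dict.empty, 0, 0, 0)
        = (d, ((winLeft f r : Int), ((best2 f r).1 : Int), ((best2 f r).2 : Int))) ∧
      ∀ x : Int, d.get? x = (lastIdx f r x).map (fun j => (j : Int)) := by
  intro r
  induction r with
  | zero =>
    intro _
    refine ⟨PySem.Dict.empty, ?_, ?_⟩
    · have h0 : winLeft f 0 = 0 := by
        have := winLeft_le f 0
        omega
      simp [h0, best2]
    · intro x
      simp [PySem.Dict.get?_empty, lastIdx]
  | succ r ih =>
    intro hr1
    have hr : r < f.length := by omega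
    obtain ⟨d, heq, hspec⟩ := ih (by omega)
    have htake : f.take (r + 1) = f.take r ++ [f[r]] := by
      rw [List.take_add_one, List.getElem?_eq_getElem hr]
      rfl
    have hlen : (f.take r).length = r := by
      rw [List.length_take]
      omega
    rw [htake, PySem.List.enumerate_append, List.foldl_append, heq, hlen]
    have henum1 : PySem.List.enumerate [f[r]] ((0 : Int) + (r : Nat)) = [((r : Int), f[r])] := by
      simp [PySem.List.enumerate_cons, PySem.List.enumerate_nil]
    rw [henum1]
    simp only [List.foldl_cons, List.foldl_nil]
    -- one pvBStep application
    unfold pvBStep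
    have hwle : winLeft f (r + 1) ≤ r := winLeft_succ_le f r
    have hwl : winLeft f (r + 1) =
        (match lastIdx f r (f[r]) with
         | some j => if winLeft f r ≤ j then j + 1 else winLeft f r
         | none => winLeft f r) := winLeft_succ f r hr
    have hbest : best2 f (r + 1)
        = pick2 (best2 f r) (winLeft f (r + 1), r - winLeft f (r + 1) + 1) := by
      unfold best2
      rw [List.range_succ, List.foldl_append]
      rfl
    -- case on the last occurrence
    cases hli : lastIdx f r (f[r]) with
    | none =>
      rw [hli] at hwl
      have hwl2 : winLeft f (r + 1) = winLeft f r := hwl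
      have hmap : d.get? (f[r]) = none := by rw [hspec, hli]; rfl
      simp only [hmap]
      refine ⟨d.insert (f[r]) (r : Int), ?_, ?_⟩
      · rw [hbest, ← hwl2]
        obtain ⟨W, hW⟩ : ∃ w, winLeft f (r + 1) = w := ⟨_, rfl⟩
        rw [hW] at hwle ⊢
        rcases hbp : best2 f r with ⟨bl0, bn0⟩
        by_cases hcmp : bn0 < r - W + 1
        · have hp : pick2 (bl0, bn0) (W, r - W + 1) = (W, r - W + 1) := by
            unfold pick2
            rw [if_pos (by simpa using hcmp)]
          rw [hp, if_pos (show ((bn0 : Int) < (r : Int) - (W : Int) + 1) by omega),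
            show (r : Int) - (W : Int) + 1 = ((r - W + 1 : Nat) : Int) by omega]
        · have hp : pick2 (bl0, bn0) (W, r - W + 1) = (bl0, bn0) := by
            unfold pick2
            rw [if_neg (by simpa using hcmp)]
          rw [hp, if_neg (show ¬ ((bn0 : Int) < (r : Int) - (W : Int) + 1) by omega)]
      · intro x
        rw [PySem.Dict.get?_insert]
        unfold lastIdx
        by_cases hx : x = f[r]
        · subst hx
          rw [if_pos rfl, if_pos (by rw [List.getElem?_eq_getElem hr])]
          rfl
        · rw [if_neg hx, if_neg (by
            rw [List.getElem?_eq_getElem hr]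
            intro hcc
            exact hx (Option.some_injective _ hcc).symm), hspec x]
    | some j =>
      rw [hli] at hwl
      have hwl2 : winLeft f (r + 1) = if winLeft f r ≤ j then j + 1 else winLeft f r := hwl
      have hmap : d.get? (f[r]) = some (j : Int) := by rw [hspec, hli]; rfl
      simp only [hmap]
      have hj : j < r := (lastIdx_some f r (f[r]) j hli).1
      have hcast : (if (winLeft f r : Int) ≤ (j : Int) then (j : Int) + 1 else (winLeft f r : Int))
          = ((winLeft f (r + 1) : Nat) : Int) := by
        rw [hwl2]
        by_cases hwj : winLeft f r ≤ j
        · rw [if_pos (by exact_mod_cast hwj), if_pos hwj]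
          push_cast
          ring
        · rw [if_neg (by exact_mod_cast hwj), if_neg hwj]
      rw [hcast]
      refine ⟨d.insert (f[r]) (r : Int), ?_, ?_⟩
      · rw [hbest]
        obtain ⟨W, hW⟩ : ∃ w, winLeft f (r + 1) = w := ⟨_, rfl⟩
        rw [hW] at hwle ⊢
        rcases hbp : best2 f r with ⟨bl0, bn0⟩
        by_cases hcmp : bn0 < r - W + 1
        · have hp : pick2 (bl0, bn0) (W, r - W + 1) = (W, r - W + 1) := by
            unfold pick2
            rw [if_pos (by simpa using hcmp)]
          rw [hp, if_pos (show ((bn0 : Int) < (r : Int) - (W : Int) + 1) by omega),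
            show (r : Int) - (W : Int) + 1 = ((r - W + 1 : Nat) : Int) by omega]
        · have hp : pick2 (bl0, bn0) (W, r - W + 1) = (bl0, bn0) := by
            unfold pick2
            rw [if_neg (by simpa using hcmp)]
          rw [hp, if_neg (show ¬ ((bn0 : Int) < (r : Int) - (W : Int) + 1) by omega)]
      · intro x
        rw [PySem.Dict.get?_insert]
        unfold lastIdx
        by_cases hx : x = f[r]
        · subst hx
          rw [if_pos rfl, if_pos (by rw [List.getElem?_eq_getElem hr])]
          rfl
        · rw [if_neg hx, if_neg (by
            rw [List.getElem?_eq_getElem hr]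
            intro hcc
            exact hx (Option.some_injective _ hcc).symm), hspec x]

theorem B_char (f : List Int) :
    make_ordered_set_alt f = (f.drop (best2 f f.length).1).take (best2 f f.length).2 := by
  obtain ⟨d, heq, -⟩ := B_loop f f.length le_rfl
  rw [List.take_length] at heq
  unfold make_ordered_set_alt
  rw [heq]
  exact PySem.List.slice_natCast_add f (best2 f f.length).1 (best2 f f.length).2

-- ---- the common argmax ----
def maxRunLen (f : List Int) : Nat :=
  ((List.range f.length).map (fun i => (runF f i).length)).foldr max 0

theorem foldr_max_zero_or_mem (l : List Nat) : l.foldr max 0 = 0 ∨ l.foldr max 0 ∈ l := by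
  induction l with
  | nil => left; rfl
  | cons x xs ih =>
    simp only [List.foldr_cons]
    rcases Nat.le_total x (xs.foldr max 0) with h | h
    · rw [max_eq_right h]
      rcases ih with h0 | hm
      · left; exact h0
      · right; exact List.mem_cons_of_mem x hm
    · rw [max_eq_left h]
      right
      exact List.mem_cons_self ..

theorem le_foldr_max (l : List Nat) (x : Nat) (hx : x ∈ l) : x ≤ l.foldr max 0 := by
  induction l with
  | nil => cases hx
  | cons y ys ih =>
    simp only [List.foldr_cons]
    rcases List.mem_cons.1 hx with rfl | h
    · exact le_max_left _ _
    · exact le_trans (ih h) (le_max_right _ _)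

theorem exists_run_len_eq_max (f : List Int) : ∃ i, (runF f i).length = maxRunLen f := by
  rcases foldr_max_zero_or_mem ((List.range f.length).map (fun i => (runF f i).length)) with h0 | hm
  · by_cases hf : f = []
    · subst hf
      exact ⟨0, rfl⟩
    · have hlen : 0 < f.length := List.length_pos_iff.2 hf
      have h1 : (runF f 0).length ≤ maxRunLen f := by
        apply le_foldr_max
        exact List.mem_map.2 ⟨0, List.mem_range.2 hlen, rfl⟩
      have h2 := runF_pos f 0 hlen
      have h0' : maxRunLen f = 0 := h0
      omega
  · obtain ⟨i, -, hi⟩ := List.mem_map.1 hm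
    exact ⟨i, hi⟩

def istar (f : List Int) : Nat := Nat.find (exists_run_len_eq_max f)

theorem runF_le_maxRunLen (f : List Int) (i : Nat) (h : i < f.length) :
    (runF f i).length ≤ maxRunLen f := by
  apply le_foldr_max
  exact List.mem_map.2 ⟨i, List.mem_range.2 h, rfl⟩

theorem maxRunLen_pos (f : List Int) (h : f ≠ []) : 1 ≤ maxRunLen f := by
  have hlen : 0 < f.length := List.length_pos_iff.2 h
  have := runF_pos f 0 hlen
  have := runF_le_maxRunLen f 0 hlen
  omega

theorem istar_lt (f : List Int) (h : f ≠ []) : istar f < f.length := by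
  have hspec : (runF f (istar f)).length = maxRunLen f := Nat.find_spec (exists_run_len_eq_max f)
  have h1 := runF_len_le f (istar f)
  have h2 := maxRunLen_pos f h
  omega

theorem istar_least (f : List Int) (i : Nat) (h : i < istar f) :
    (runF f i).length < maxRunLen f := by
  have hne := Nat.find_min (exists_run_len_eq_max f) h
  have hle : (runF f i).length ≤ maxRunLen f := by
    by_cases hf : f = []
    · subst hf
      unfold runF
      simp [scanRun, maxRunLen]
    · by_cases hi : i < f.length
      · exact runF_le_maxRunLen f i hi
      · have : f.drop i = [] := List.drop_eq_nil_of_le (by omega)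
        unfold runF
        rw [this]
        simp [scanRun]
  omega

-- window lengths never exceed the best run
theorem w_le_maxRunLen (f : List Int) (r : Nat) (hr : r < f.length) :
    r + 1 - winLeft f (r + 1) ≤ maxRunLen f := by
  have hl := winLeft_succ_le f r
  have hnd : ((f.drop (winLeft f (r + 1))).take (r + 1 - winLeft f (r + 1))).Nodup :=
    (winLeft_spec f (winLeft f (r + 1)) (r + 1)).2 le_rfl
  have hrun := runF_max f (winLeft f (r + 1)) (r + 1 - winLeft f (r + 1)) (by omega) hnd
  have hmax := runF_le_maxRunLen f (winLeft f (r + 1)) (by omega)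
  omega

-- at r* = istar + L - 1 the window is exactly the best run
theorem winLeft_at_rstar (f : List Int) (h : f ≠ []) :
    winLeft f (istar f + maxRunLen f) = istar f := by
  have hspec : (runF f (istar f)).length = maxRunLen f := Nat.find_spec (exists_run_len_eq_max f)
  have hil : istar f < f.length := istar_lt f h
  have hL1 : 1 ≤ maxRunLen f := maxRunLen_pos f h
  have hsum : istar f + maxRunLen f ≤ f.length := by
    have := runF_len_le f (istar f)
    omega
  apply le_antisymm
  · apply (winLeft_spec f (istar f) (istar f + maxRunLen f)).1
    rw [show istar f + maxRunLen f - istar f = maxRunLen f by omega]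
    have := runF_take f (istar f)
    rw [hspec] at this
    rw [← this]
    exact runF_nodup f (istar f)
  · by_contra hc
    have hw : winLeft f (istar f + maxRunLen f) < istar f := by omega
    have hnd : ((f.drop (winLeft f (istar f + maxRunLen f))).take
        (istar f + maxRunLen f - winLeft f (istar f + maxRunLen f))).Nodup :=
      (winLeft_spec f (winLeft f (istar f + maxRunLen f)) (istar f + maxRunLen f)).2 le_rfl
    have hrun := runF_max f (winLeft f (istar f + maxRunLen f))
      (istar f + maxRunLen f - winLeft f (istar f + maxRunLen f)) (by omega) hnd
    have hmax := runF_le_maxRunLen f (winLeft f (istar f + maxRunLen f)) (by omega)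
    omega

theorem w_lt_before_rstar (f : List Int) (h : f ≠ []) (r : Nat)
    (hr : r < istar f + maxRunLen f - 1) (hrn : r < f.length) :
    r + 1 - winLeft f (r + 1) < maxRunLen f := by
  have hle := w_le_maxRunLen f r hrn
  by_contra hc
  have heqL : r + 1 - winLeft f (r + 1) = maxRunLen f := by omega
  have hl := winLeft_succ_le f r
  have hnd : ((f.drop (winLeft f (r + 1))).take (r + 1 - winLeft f (r + 1))).Nodup :=
    (winLeft_spec f (winLeft f (r + 1)) (r + 1)).2 le_rfl
  have hrun := runF_max f (winLeft f (r + 1)) (r + 1 - winLeft f (r + 1)) (by omega) hnd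
  have hmax := runF_le_maxRunLen f (winLeft f (r + 1)) (by omega)
  have heq : (runF f (winLeft f (r + 1))).length = maxRunLen f := by omega
  have hfind : istar f ≤ winLeft f (r + 1) := Nat.find_min' (exists_run_len_eq_max f) heq
  have hL1 : 1 ≤ maxRunLen f := maxRunLen_pos f h
  omega

theorem range_split (n k : Nat) (hk : k < n) :
    List.range n = List.range' 0 k ++ k :: List.range' (k + 1) (n - k - 1) := by
  rw [List.range_eq_range']
  have h1 : n = k + (n - k) := by omega
  rw [h1, ← List.range'_append_1]
  congr 1
  have h2 : n - k = (n - k - 1) + 1 := by omega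
  rw [h2, List.range'_succ]
  simp

theorem best2_eq (f : List Int) :
    best2 f f.length = (istar f, maxRunLen f) ∨ f = [] := by
  by_cases hf : f = []
  · right
    exact hf
  left
  have hil : istar f < f.length := istar_lt f hf
  have hL1 : 1 ≤ maxRunLen f := maxRunLen_pos f hf
  have hspec : (runF f (istar f)).length = maxRunLen f := Nat.find_spec (exists_run_len_eq_max f)
  have hsum : istar f + maxRunLen f ≤ f.length := by
    have := runF_len_le f (istar f)
    omega
  have hb : best2 f f.length = ((List.range f.length).map
      (fun r' => (winLeft f (r' + 1), r' - winLeft f (r' + 1) + 1))).foldl pick2 (0, 0) := by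
    unfold best2
    rw [List.foldl_map]
  rw [hb, range_split f.length (istar f + maxRunLen f - 1) (by omega), List.map_append,
    List.map_cons]
  have hq : (winLeft f (istar f + maxRunLen f - 1 + 1),
      istar f + maxRunLen f - 1 - winLeft f (istar f + maxRunLen f - 1 + 1) + 1)
      = (istar f, maxRunLen f) := by
    rw [show istar f + maxRunLen f - 1 + 1 = istar f + maxRunLen f by omega,
      winLeft_at_rstar f hf]
    rw [show istar f + maxRunLen f - 1 - istar f + 1 = maxRunLen f by omega]
  rw [hq]
  apply foldl_pick2_first_max
  · exact hL1
  · intro y hy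
    obtain ⟨r', hr', rfl⟩ := List.mem_map.1 hy
    have hm := List.mem_range'_1.1 hr'
    have hrn : r' < f.length := by omega
    have hwle := winLeft_succ_le f r'
    have := w_lt_before_rstar f hf r' (by omega) hrn
    simp only []
    omega
  · intro z hz
    obtain ⟨r', hr', rfl⟩ := List.mem_map.1 hz
    have hm := List.mem_range'_1.1 hr'
    have hrn : r' < f.length := by omega
    have hwle := winLeft_succ_le f r'
    have := w_le_maxRunLen f r' hrn
    simp only []
    omega

theorem main_eq (f : List Int) : make_ordered_set f = make_ordered_set_alt f := by
  by_cases hf : f = []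
  · subst hf
    rfl
  · rw [A_char f, B_char f]
    rcases best2_eq f with hbe | hfe
    · rw [hbe]
      have hil : istar f < f.length := istar_lt f hf
      have hL1 : 1 ≤ maxRunLen f := maxRunLen_pos f hf
      have hspec : (runF f (istar f)).length = maxRunLen f := Nat.find_spec (exists_run_len_eq_max f)
      have hdt : (f.drop (istar f, maxRunLen f).1).take (istar f, maxRunLen f).2
          = runF f (istar f) := by
        simp only []
        rw [← hspec]
        exact (runF_take f (istar f)).symm
      rw [hdt, range_split f.length (istar f) hil, List.map_append, List.map_cons]
      apply foldl_pick_first_max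
      · simp only [List.length_nil]
        omega
      · intro y hy
        obtain ⟨i, hi, rfl⟩ := List.mem_map.1 hy
        have hm := List.mem_range'_1.1 hi
        have := istar_least f i (by omega)
        omega
      · intro z hz
        obtain ⟨i, hi, rfl⟩ := List.mem_map.1 hz
        have hm := List.mem_range'_1.1 hi
        have hin : i < f.length := by omega
        have := runF_le_maxRunLen f i hin
        omega
    · exact absurd hfe hf

-- ===== VERDICT (by name: the statement is the Claim_ definition above) =====
theorem make_ordered_set_spec : Claim_equal_make_ordered_set := by
  intro f _
  unfold Spec_make_ordered_set
  exact main_eq f
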